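-- pv_equiv track=rewrite | github.com/Skyoxima/Cryptography_and_Hashing | own_cipher.py | ascii_list_binarizer
-- ===== SOURCE A (Python) =====
-- def dec_to_binary(dec_num):
--   bin_num = []
--   def recursive_bin_mechanism(num):
--     if num >= 1:
--       recursive_bin_mechanism(num // 2)
--       bin_num.append(num % 2)
--
--   recursive_bin_mechanism(dec_num)
--   return bin_num
--
-- def ascii_list_binarizer(ascii_list):
--   all_nums_bin_repr = []
--   for num in ascii_list:
--     single_num = dec_to_binary(num)
--     while len(single_num) != 8:
--       single_num.insert(0, 0)
--     all_nums_bin_repr.extend(single_num)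
--   return all_nums_bin_repr
-- ===== SOURCE B (Python) =====
-- def ascii_list_binarizer(ascii_list):
--   return [bit for num in ascii_list for bit in byte_bits(num)]
--
-- def byte_bits(num):
--   bits = []
--   while num >= 1:
--     bits.append(num % 2)
--     num //= 2
--   bits.reverse()
--   return [0] * (8 - len(bits)) + bits
-- ===== Notes on version B (the rewrite author's own statement) =====
-- stated objective: simpler
-- what changed: Replaces the recursive helper with mutable-closure state by an iterative LSB-first bit loop plus reverse, and replaces the insert(0,0)-until-8 padding loop and extend-accumulator by a single arithmetic pad ([0]*(8-len)+bits) inside one flat comprehension.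
import Mathlib
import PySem

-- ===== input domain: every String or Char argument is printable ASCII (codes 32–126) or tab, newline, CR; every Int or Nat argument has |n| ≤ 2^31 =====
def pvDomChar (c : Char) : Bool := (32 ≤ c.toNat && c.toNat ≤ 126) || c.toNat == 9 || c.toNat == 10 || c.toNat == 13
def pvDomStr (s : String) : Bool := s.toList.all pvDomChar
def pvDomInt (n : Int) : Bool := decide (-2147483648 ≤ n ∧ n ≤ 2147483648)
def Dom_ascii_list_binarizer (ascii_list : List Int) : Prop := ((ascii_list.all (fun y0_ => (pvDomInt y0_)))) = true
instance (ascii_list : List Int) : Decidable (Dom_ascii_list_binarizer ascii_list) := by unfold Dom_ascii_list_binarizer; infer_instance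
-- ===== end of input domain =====

-- B replaces A's recursive helper (with a mutable closure list) and its insert(0,0)-until-8
-- padding loop by an iterative LSB-first bit loop plus reverse and an arithmetic pad, in one
-- flat comprehension; objective: simpler.

-- termination lemma for the halving recursions of both ports
theorem pvFdivLt (n : Int) (h : 1 ≤ n) : (PySem.Int.floordiv n 2).toNat < n.toNat := by
  have h1 := PySem.Int.floordiv_mul_add_mod n 2
  have h2 := PySem.Int.mod_nonneg n (by norm_num : (0:Int) < 2)
  have h3 := PySem.Int.mod_lt n (by norm_num : (0:Int) < 2)
  omega

-- ===== PORT A =====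
-- dec_to_binary: recursive_bin_mechanism appends MSB-first; bin_num accumulates via the closure
def dec_to_binary (num : Int) : List Int :=
  if 1 ≤ num then dec_to_binary (PySem.Int.floordiv num 2) ++ [PySem.Int.mod num 2] else []
termination_by num.toNat
decreasing_by exact pvFdivLt num (by omega)

-- 'while len(single_num) != 8: single_num.insert(0, 0)'.  When the list is LONGER than 8 the
-- Python loop never terminates (excluded by Pre_); the port returns the list unchanged there.
def padA (l : List Int) : List Int :=
  if l.length = 8 then l
  else if l.length < 8 then padA (0 :: l)
  else l
termination_by 8 - l.length

def ascii_list_binarizer (ascii_list : List Int) : List Int :=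
  ascii_list.foldl (fun acc num => acc ++ padA (dec_to_binary num)) []

-- ===== PORT B =====
-- 'while num >= 1: bits.append(num % 2); num //= 2'
def bitLoopB (num : Int) (bits : List Int) : List Int :=
  if 1 ≤ num then bitLoopB (PySem.Int.floordiv num 2) (bits ++ [PySem.Int.mod num 2]) else bits
termination_by num.toNat
decreasing_by exact pvFdivLt num (by omega)

def byte_bits (num : Int) : List Int :=
  let bits := (bitLoopB num []).reverse
  List.replicate (8 - bits.length) 0 ++ bits

def ascii_list_binarizer_alt (ascii_list : List Int) : List Int :=
  ascii_list.flatMap byte_bits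

-- ===== PRECONDITION & SPEC =====
-- Pre_ excludes elements ≥ 256, on which A's padding loop never terminates (A returns nothing).
def Pre_ascii_list_binarizer (ascii_list : List Int) : Prop :=
  ∀ n ∈ ascii_list, n ≤ 255
instance (ascii_list : List Int) : Decidable (Pre_ascii_list_binarizer ascii_list) := by
  unfold Pre_ascii_list_binarizer; infer_instance

def pvWitness_ascii_list_binarizer : List Int := [72, 0, -3, 255, 105]

def Spec_ascii_list_binarizer (ascii_list : List Int) (out : List Int) : Prop := out = ascii_list_binarizer_alt ascii_list
instance (ascii_list : List Int) (out : List Int) : Decidable (Spec_ascii_list_binarizer ascii_list out) := by unfold Spec_ascii_list_binarizer; infer_instance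

-- ===== CLAIM (what is proved, stated in full; the proofs are below) =====
def Claim_equal_ascii_list_binarizer : Prop := ∀ (ascii_list : List Int), Dom_ascii_list_binarizer ascii_list → Pre_ascii_list_binarizer ascii_list → Spec_ascii_list_binarizer ascii_list (ascii_list_binarizer ascii_list)

-- ===== LEMMAS AND PROOFS =====

-- B's iterative loop collects exactly A's recursive bit string, reversed
theorem bitLoopB_eq_rev (k : Nat) : ∀ (n : Int), n.toNat ≤ k → ∀ (acc : List Int),
    bitLoopB n acc = acc ++ (dec_to_binary n).reverse := by
  induction k with
  | zero =>
    intro n hk acc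
    have hn : ¬ (1 ≤ n) := by omega
    rw [bitLoopB, dec_to_binary]
    simp [hn]
  | succ k ih =>
    intro n hk acc
    rw [bitLoopB, dec_to_binary]
    by_cases hn : 1 ≤ n
    · simp only [hn, if_pos]
      rw [ih (PySem.Int.floordiv n 2) (by have := pvFdivLt n hn; omega)]
      simp
    · simp [hn]

-- bit length bound: n < 2^k  →  at most k bits
theorem dec_to_binary_len (k : Nat) : ∀ (n : Int), n < 2 ^ k → (dec_to_binary n).length ≤ k := by
  induction k with
  | zero =>
    intro n h
    have hn : ¬ (1 ≤ n) := by simpa using h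
    rw [dec_to_binary]; simp [hn]
  | succ k ih =>
    intro n h
    rw [dec_to_binary]
    by_cases hn : 1 ≤ n
    · simp only [hn, if_pos, List.length_append, List.length_singleton]
      have hdiv : PySem.Int.floordiv n 2 < 2 ^ k := by
        have h1 := PySem.Int.floordiv_mul_add_mod n 2
        have h2 := PySem.Int.mod_nonneg n (by norm_num : (0:Int) < 2)
        have h3 := PySem.Int.mod_lt n (by norm_num : (0:Int) < 2)
        have hp : (2:Int) ^ (k+1) = 2 * 2 ^ k := by ring
        omega
      have := ih _ hdiv
      omega
    · simp [hn]

-- A's insert(0,0) padding is the arithmetic pad, for lists of length ≤ 8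
theorem padA_eq (k : Nat) : ∀ (l : List Int), l.length + k = 8 →
    padA l = List.replicate k 0 ++ l := by
  induction k with
  | zero =>
    intro l h
    rw [padA]; simp at h ⊢; omega
  | succ k ih =>
    intro l h
    rw [padA]
    have h8 : ¬ (l.length = 8) := by omega
    have hlt : l.length < 8 := by omega
    simp only [h8, if_false, hlt, if_pos]
    rw [ih (0 :: l) (by simp; omega)]
    simp [List.replicate_succ']

-- per-element agreement for n ≤ 255
theorem elem_eq (n : Int) (h : n ≤ 255) : padA (dec_to_binary n) = byte_bits n := by
  have hb := bitLoopB_eq_rev n.toNat n (le_refl _) []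
  have hlen : (dec_to_binary n).length ≤ 8 :=
    dec_to_binary_len 8 n (by omega)
  unfold byte_bits
  rw [hb]
  simp only [List.nil_append, List.reverse_reverse]
  exact padA_eq (8 - (dec_to_binary n).length) _ (by omega)

theorem flat_eq : ∀ (l : List Int), (∀ n ∈ l, n ≤ 255) →
    l.flatMap (fun num => padA (dec_to_binary num)) = l.flatMap byte_bits := by
  intro l hpre
  induction l with
  | nil => rfl
  | cons x xs ih =>
    simp only [List.flatMap_cons]
    rw [elem_eq x (hpre x (by simp)), ih (fun n hn => hpre n (by simp [hn]))]

-- ===== VERDICT (by name: the statement is the Claim_ definition above) =====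
theorem ascii_list_binarizer_spec : Claim_equal_ascii_list_binarizer := by
  intro ascii_list _hdom hpre
  unfold Spec_ascii_list_binarizer ascii_list_binarizer ascii_list_binarizer_alt
  rw [PySem.List.foldl_append_eq_flatMap]
  simp only [List.nil_append]
  exact flat_eq ascii_list hpre
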